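-- pv_equiv track=rewrite | github.com/SmukerSPB/MatLogic | Minesweeper/main.py | chk_bomb
-- ===== SOURCE A (Python) =====
-- import itertools
--
-- digits = "0123456789"
--
-- def get_from_known_or_empty(known, r, c):
--     # I'm lazy to do overflow checks
--     try:
--         return known[r][c]
--     except IndexError:
--         return ""
--
-- def have_neighbour_digit(known, r, c, HEIGHT, WIDTH):
--     # returns True if neighbour is digit, False otherwise
--     t = []
--     t.append(get_from_known_or_empty(known, r - 1, c - 1) in digits)
--     t.append(get_from_known_or_empty(known, r - 1, c) in digits)
--     t.append(get_from_known_or_empty(known, r - 1, c + 1) in digits)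
--     t.append(get_from_known_or_empty(known, r, c - 1) in digits)
--     t.append(get_from_known_or_empty(known, r, c + 1) in digits)
--     t.append(get_from_known_or_empty(known, r + 1, c - 1) in digits)
--     t.append(get_from_known_or_empty(known, r + 1, c) in digits)
--     t.append(get_from_known_or_empty(known, r + 1, c + 1) in digits)
--     return any(t)
--
-- def check_all_eqs(eqs, assignment):
--     for eq in eqs:
--         result = 0
--         for term in eq[0]:
--             if term in assignment:
--                 result = result + assignment[term]
--         if eq[1] != result:
--             # at least one eq is UNSAT
--             return "UNSAT"
--     # all eqs are SAT
--     return "SAT"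
--
-- def chk_bomb(known, bomb, eqs):
--     WIDTH = len(known[0])
--     HEIGHT = len(known)
--
--     to_be_assigned = []
--     for r in range(HEIGHT):
--         for c in range(WIDTH):
--             if known[r][c] == "?" and have_neighbour_digit(known, r, c, HEIGHT, WIDTH) and bomb != (r, c):
--                 to_be_assigned.append((r, c))
--     to_be_assigned_t = len(to_be_assigned)
--     # bruteforce. try all 0/1 for all coords in to_be_assigned[]:
--     # we do full bruteforce to be sure that no equation can be SAT under any assignment
--     for assignment in itertools.product([0, 1], repeat=to_be_assigned_t):
--         t = {}
--         for i in zip(to_be_assigned, assignment):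
--             t[i[0]] = i[1]
--         # add bomb to assignment:
--         t[bomb] = 1
--         if check_all_eqs(eqs, t) == "SAT":
--             # bomb can be at $bomb$
--             return None
--
--     # all assignments checked at this point
--     # UNSAT
--     # no bomb can be at bomb
--     return bomb
-- ===== SOURCE B (Python) =====
-- digits = "0123456789"
--
-- def get_from_known_or_empty(known, r, c):
--     # I'm lazy to do overflow checks
--     try:
--         return known[r][c]
--     except IndexError:
--         return ""
--
-- def have_neighbour_digit(known, r, c, HEIGHT, WIDTH):
--     # returns True if neighbour is digit, False otherwise
--     t = []
--     t.append(get_from_known_or_empty(known, r - 1, c - 1) in digits)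
--     t.append(get_from_known_or_empty(known, r - 1, c) in digits)
--     t.append(get_from_known_or_empty(known, r - 1, c + 1) in digits)
--     t.append(get_from_known_or_empty(known, r, c - 1) in digits)
--     t.append(get_from_known_or_empty(known, r, c + 1) in digits)
--     t.append(get_from_known_or_empty(known, r + 1, c - 1) in digits)
--     t.append(get_from_known_or_empty(known, r + 1, c) in digits)
--     t.append(get_from_known_or_empty(known, r + 1, c + 1) in digits)
--     return any(t)
--
-- def chk_bomb(known, bomb, eqs):
--     # Depth-first backtracking with constraint propagation instead of
--     # enumerating all 2^n assignments: a branch dies as soon as some equation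
--     # whose terms are all decided misses its target.
--     HEIGHT = len(known)
--     WIDTH = len(known[0])
--     to_be_assigned = [(r, c) for r in range(HEIGHT) for c in range(WIDTH)
--                       if known[r][c] == "?"
--                       and have_neighbour_digit(known, r, c, HEIGHT, WIDTH)
--                       and bomb != (r, c)]
--
--     def dfs(assignment, remaining):
--         # prune: every equation whose terms are all decided must already match
--         rem = set(remaining)
--         for terms, target in eqs:
--             if all(t in assignment or t not in rem for t in terms):
--                 if sum(assignment.get(t, 0) for t in terms) != target:
--                     return False
--         if not remaining:
--             return True
--         var = remaining[0]
--         rest = remaining[1:]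
--         for v in (0, 1):
--             assignment[var] = v
--             if dfs(assignment, rest):
--                 return True
--         del assignment[var]
--         return False
--
--     return None if dfs({bomb: 1}, to_be_assigned) else bomb
-- ===== Notes on version B (the rewrite author's own statement) =====
-- stated objective: alternative
-- what changed: Replaces the itertools.product enumeration of all 2^n assignments (each checked from scratch) by a recursive depth-first backtracking search that extends a partial assignment seeded with {bomb:1} and prunes any branch in which some equation whose terms are all decided already misses its target.
import Mathlib
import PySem

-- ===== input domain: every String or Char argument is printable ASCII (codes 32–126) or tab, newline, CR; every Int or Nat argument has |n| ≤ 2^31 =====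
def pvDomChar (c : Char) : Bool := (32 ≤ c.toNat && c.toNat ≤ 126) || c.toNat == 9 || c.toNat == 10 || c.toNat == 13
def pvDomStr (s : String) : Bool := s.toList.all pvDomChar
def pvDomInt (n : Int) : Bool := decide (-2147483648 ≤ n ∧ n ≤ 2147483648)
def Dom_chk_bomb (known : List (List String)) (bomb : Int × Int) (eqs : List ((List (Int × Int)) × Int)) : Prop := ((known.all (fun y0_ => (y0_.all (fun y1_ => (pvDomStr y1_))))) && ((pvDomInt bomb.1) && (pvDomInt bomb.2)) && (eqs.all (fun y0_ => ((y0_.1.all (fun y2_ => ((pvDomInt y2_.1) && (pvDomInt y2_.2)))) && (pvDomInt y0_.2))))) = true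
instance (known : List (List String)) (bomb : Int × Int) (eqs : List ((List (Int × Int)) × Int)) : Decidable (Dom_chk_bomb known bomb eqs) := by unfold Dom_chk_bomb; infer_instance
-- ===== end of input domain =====

-- B replaces the itertools.product enumeration of all 2^n assignments by a depth-first
-- backtracking search with pruning on fully-determined equations (objective: alternative).

-- ===== PORT A =====
-- module constant `digits`
def pvDigits : String := "0123456789"

-- shared module helper: known[r][c] with IndexError caught → ""
def get_from_known_or_empty (known : List (List String)) (r c : Int) : String :=
  match PySem.List.pyGet? known r with
  | none => ""
  | some row =>
    match PySem.List.pyGet? row c with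
    | none => ""
    | some s => s

-- shared module helper (list of 8 membership tests, then any(t))
def have_neighbour_digit (known : List (List String)) (r c _HEIGHT _WIDTH : Int) : Bool :=
  let t : List Bool :=
    [PySem.Str.isIn (get_from_known_or_empty known (r - 1) (c - 1)) pvDigits,
     PySem.Str.isIn (get_from_known_or_empty known (r - 1) c) pvDigits,
     PySem.Str.isIn (get_from_known_or_empty known (r - 1) (c + 1)) pvDigits,
     PySem.Str.isIn (get_from_known_or_empty known r (c - 1)) pvDigits,
     PySem.Str.isIn (get_from_known_or_empty known r (c + 1)) pvDigits,
     PySem.Str.isIn (get_from_known_or_empty known (r + 1) (c - 1)) pvDigits,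
     PySem.Str.isIn (get_from_known_or_empty known (r + 1) c) pvDigits,
     PySem.Str.isIn (get_from_known_or_empty known (r + 1) (c + 1)) pvDigits]
  t.any id

-- the loop guard `known[r][c] == "?" and have_neighbour_digit(...) and bomb != (r, c)`,
-- identical in both Pythons; the indexings are total via pyGetD, exact under Pre_
def pvWants (known : List (List String)) (bomb : Int × Int) (r c : Int) : Bool :=
  (PySem.List.pyGetD (PySem.List.pyGetD known r []) c "" == "?")
    && have_neighbour_digit known r c (known.length : Int) ((PySem.List.pyGetD known 0 []).length : Int)
    && (bomb != (r, c))

-- check_all_eqs, returning the strings the Python returns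
def check_all_eqs : List ((List (Int × Int)) × Int) → PySem.Dict (Int × Int) Int → String
  | [], _ => "SAT"
  | eq :: rest, assignment =>
    let result : Int := eq.1.foldl
      (fun result term =>
        if assignment.contains term then result + assignment.getD term 0 else result) 0
    if eq.2 ≠ result then "UNSAT" else check_all_eqs rest assignment

-- itertools.product([0, 1], repeat=n) as a list, in iteration order
def pvProduct01 : Nat → List (List Int)
  | 0 => [[]]
  | n + 1 => ([0, 1] : List Int).flatMap (fun x => (pvProduct01 n).map (fun rest => x :: rest))

-- the `for assignment in itertools.product(...)` loop of A
def chk_bomb_loop (eqs : List ((List (Int × Int)) × Int)) (to_be_assigned : List (Int × Int))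
    (bomb : Int × Int) : List (List Int) → Option (Int × Int)
  | [] => some bomb
  | assignment :: more =>
    let t := (to_be_assigned.zip assignment).foldl (fun t i => t.insert i.1 i.2) PySem.Dict.empty
    let t := t.insert bomb 1
    if check_all_eqs eqs t == "SAT" then none
    else chk_bomb_loop eqs to_be_assigned bomb more

def chk_bomb (known : List (List String)) (bomb : Int × Int) (eqs : List ((List (Int × Int)) × Int)) : Option (Int × Int) :=
  let WIDTH : Int := ((PySem.List.pyGetD known 0 []).length : Int)  -- known[0]: raises on [] (excluded by Pre_)
  let HEIGHT : Int := (known.length : Int)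
  let to_be_assigned : List (Int × Int) :=
    (PySem.List.pyRange 0 HEIGHT 1).foldl (fun acc r =>
      (PySem.List.pyRange 0 WIDTH 1).foldl (fun acc c =>
        if pvWants known bomb r c then acc ++ [(r, c)] else acc) acc) []
  chk_bomb_loop eqs to_be_assigned bomb (pvProduct01 to_be_assigned.length)

-- ===== PORT B =====
-- dfs(assignment, remaining) of Source B: prune on fully-determined equations, else branch 0/1
def pvDfs (eqs : List ((List (Int × Int)) × Int)) :
    PySem.Dict (Int × Int) Int → List (Int × Int) → Bool
  | assignment, remaining =>
    let rem : PySem.Set (Int × Int) := PySem.Set.ofList remaining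
    let ok : Bool := eqs.all (fun eq =>
      if eq.1.all (fun t => assignment.contains t || !(PySem.Set.contains rem t)) then
        (eq.1.foldl (fun s t => s + assignment.getD t 0) 0) == eq.2
      else true)
    if ok then
      match remaining with
      | [] => true
      | var :: rest =>
        pvDfs eqs (assignment.insert var 0) rest || pvDfs eqs (assignment.insert var 1) rest
    else false
  termination_by _ remaining => remaining.length
  decreasing_by all_goals simp

def chk_bomb_alt (known : List (List String)) (bomb : Int × Int) (eqs : List ((List (Int × Int)) × Int)) : Option (Int × Int) :=
  let HEIGHT : Int := (known.length : Int)
  let WIDTH : Int := ((PySem.List.pyGetD known 0 []).length : Int)  -- known[0]: raises on [] (excluded by Pre_)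
  let to_be_assigned : List (Int × Int) :=
    (PySem.List.pyRange 0 HEIGHT 1).flatMap (fun r =>
      ((PySem.List.pyRange 0 WIDTH 1).filter (fun c => pvWants known bomb r c)).map (fun c => (r, c)))
  if pvDfs eqs (PySem.Dict.empty.insert bomb 1) to_be_assigned then none else bomb

-- ===== PRECONDITION & SPEC =====
-- Pre_ excludes exactly the inputs on which the Python raises IndexError: an empty grid
-- (len(known[0])) and grids with a row shorter than the first row (known[r][c] in the loop).
def Pre_chk_bomb (known : List (List String)) (_bomb : Int × Int) (_eqs : List ((List (Int × Int)) × Int)) : Prop :=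
  known ≠ [] ∧ ∀ row ∈ known, (known.headD []).length ≤ row.length
instance (known : List (List String)) (bomb : Int × Int) (eqs : List ((List (Int × Int)) × Int)) : Decidable (Pre_chk_bomb known bomb eqs) := by unfold Pre_chk_bomb; infer_instance

def pvWitness_chk_bomb : List (List String) × (Int × Int) × (List ((List (Int × Int)) × Int)) :=
  ([["1", "?"], ["?", "0"]], (0, 1), [([(0, 1), (1, 0)], 1)])

def Spec_chk_bomb (known : List (List String)) (bomb : Int × Int) (eqs : List ((List (Int × Int)) × Int)) (out : Option (Int × Int)) : Prop := out = chk_bomb_alt known bomb eqs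
instance (known : List (List String)) (bomb : Int × Int) (eqs : List ((List (Int × Int)) × Int)) (out : Option (Int × Int)) : Decidable (Spec_chk_bomb known bomb eqs out) := by unfold Spec_chk_bomb; infer_instance

-- ===== CLAIM (what is proved, stated in full; the proofs are below) =====
def Claim_equal_chk_bomb : Prop := ∀ (known : List (List String)) (bomb : Int × Int) (eqs : List ((List (Int × Int)) × Int)), Dom_chk_bomb known bomb eqs → Pre_chk_bomb known bomb eqs → Spec_chk_bomb known bomb eqs (chk_bomb known bomb eqs)

-- ===== LEMMAS AND PROOFS =====

-- `satB eqs d` = the boolean "every equation's sum of assigned terms meets its target"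
def satB (eqs : List ((List (Int × Int)) × Int)) (d : PySem.Dict (Int × Int) Int) : Bool :=
  eqs.all (fun eq => (eq.1.foldl (fun s t => s + d.getD t 0) 0) == eq.2)

-- extending a dict by a zip of keys and values (shape shared by both ports' dict builds)
def extendD (d : PySem.Dict (Int × Int) Int) (ks : List (Int × Int)) (vs : List Int) :
    PySem.Dict (Int × Int) Int :=
  (ks.zip vs).foldl (fun t i => t.insert i.1 i.2) d

theorem sum_terms_eq (d : PySem.Dict (Int × Int) Int) (terms : List (Int × Int)) :
    terms.foldl (fun result term =>
      if d.contains term then result + d.getD term 0 else result) 0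
    = terms.foldl (fun s t => s + d.getD t 0) 0 := by
  have : (fun (result : Int) term =>
      if d.contains term then result + d.getD term 0 else result)
      = (fun s t => s + d.getD t 0) := by
    funext s t
    by_cases h : d.contains t = true
    · simp [h]
    · simp only [Bool.not_eq_true] at h
      rw [PySem.Dict.getD_of_not_contains d 0 h]
      simp [h]
  rw [this]

theorem check_all_eqs_eq_satB (eqs : List ((List (Int × Int)) × Int))
    (d : PySem.Dict (Int × Int) Int) :
    (check_all_eqs eqs d == "SAT") = satB eqs d := by
  induction eqs with
  | nil => simp [check_all_eqs, satB]
  | cons eq rest ih =>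
    simp only [check_all_eqs, satB, List.all_cons]
    rw [sum_terms_eq]
    by_cases h : eq.2 = eq.1.foldl (fun s t => s + d.getD t 0) 0
    · simp [h]
      exact ih
    · simp [h, Ne.symm h]

theorem chk_bomb_loop_eq (eqs : List ((List (Int × Int)) × Int)) (tba : List (Int × Int))
    (bomb : Int × Int) (l : List (List Int)) :
    chk_bomb_loop eqs tba bomb l
      = if l.any (fun vals => satB eqs ((extendD PySem.Dict.empty tba vals).insert bomb 1))
        then none else some bomb := by
  induction l with
  | nil => simp [chk_bomb_loop]
  | cons vals more ih =>
    simp only [chk_bomb_loop, List.any_cons]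
    rw [show ((tba.zip vals).foldl (fun t i => t.insert i.1 i.2) PySem.Dict.empty)
          = extendD PySem.Dict.empty tba vals from rfl]
    rw [check_all_eqs_eq_satB]
    by_cases h : satB eqs ((extendD PySem.Dict.empty tba vals).insert bomb 1) = true
    · simp [h]
    · simp only [Bool.not_eq_true] at h
      simp [h, ih]

theorem extend_get?_congr (ps : List ((Int × Int) × Int)) (t : Int × Int) :
    ∀ (d1 d2 : PySem.Dict (Int × Int) Int), d1.get? t = d2.get? t →
    (ps.foldl (fun d i => d.insert i.1 i.2) d1).get? t
      = (ps.foldl (fun d i => d.insert i.1 i.2) d2).get? t := by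
  induction ps with
  | nil => intro d1 d2 h; simpa using h
  | cons p ps ih =>
    intro d1 d2 h
    simp only [List.foldl_cons]
    exact ih _ _ (by rw [PySem.Dict.get?_insert, PySem.Dict.get?_insert, h])

theorem extend_get?_not_mem (ks : List (Int × Int)) :
    ∀ (vs : List Int) (d : PySem.Dict (Int × Int) Int) (t : Int × Int), t ∉ ks →
    (extendD d ks vs).get? t = d.get? t := by
  induction ks with
  | nil => intro vs d t _; simp [extendD]
  | cons k ks ih =>
    intro vs d t ht
    cases vs with
    | nil => simp [extendD]
    | cons v vs =>
      simp only [extendD, List.zip_cons_cons, List.foldl_cons]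
      rw [show ((ks.zip vs).foldl (fun d i => d.insert i.1 i.2) (d.insert k v))
            = extendD (d.insert k v) ks vs from rfl]
      rw [ih vs _ t (by simp at ht; tauto)]
      rw [PySem.Dict.get?_insert]
      simp at ht
      simp [ht.1]

-- both ports' final dicts answer every lookup identically (bomb not among the variables)
theorem dict_get?_eq (tba : List (Int × Int)) (vals : List Int) (bomb : Int × Int)
    (hb : bomb ∉ tba) (t : Int × Int) :
    ((extendD PySem.Dict.empty tba vals).insert bomb 1).get? t
      = (extendD (PySem.Dict.empty.insert bomb 1) tba vals).get? t := by
  by_cases h : t = bomb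
  · subst h
    rw [PySem.Dict.get?_insert_self, extend_get?_not_mem tba vals _ t hb,
      PySem.Dict.get?_insert_self]
  · rw [PySem.Dict.get?_insert _ _ _ _]
    simp only [h, if_false]
    exact extend_get?_congr _ t _ _ (by rw [PySem.Dict.get?_insert]; simp [h])

theorem satB_congr (eqs : List ((List (Int × Int)) × Int))
    (d1 d2 : PySem.Dict (Int × Int) Int) (h : ∀ t, d1.get? t = d2.get? t) :
    satB eqs d1 = satB eqs d2 := by
  have hd : ∀ t : Int × Int, d1.getD t 0 = d2.getD t 0 := by
    intro t
    rw [PySem.Dict.getD_eq_get?_getD, PySem.Dict.getD_eq_get?_getD, h t]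
  have : (fun (s : Int) (t : Int × Int) => s + d1.getD t 0)
      = (fun s t => s + d2.getD t 0) := by funext s t; rw [hd t]
  simp [satB, this]

-- the main dfs characterisation: under the reachability invariant, dfs decides
-- exactly whether some full assignment of the remaining variables satisfies all equations
theorem pvDfs_eq (eqs : List ((List (Int × Int)) × Int)) (remaining : List (Int × Int)) :
    ∀ (d : PySem.Dict (Int × Int) Int), (∀ k ∈ remaining, d.get? k = none) → remaining.Nodup →
    pvDfs eqs d remaining
      = (pvProduct01 remaining.length).any (fun vals => satB eqs (extendD d remaining vals)) := by
  induction remaining with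
  | nil =>
    intro d _ _
    rw [pvDfs]
    simp [pvProduct01, PySem.Set.ofList, PySem.Set.contains, extendD, satB]
  | cons var rest ih =>
    intro d hinv hnd
    have hvar : var ∉ rest := by simp [List.nodup_cons] at hnd; exact hnd.1
    have hnd' : rest.Nodup := by simp [List.nodup_cons] at hnd; exact hnd.2
    have hinv' : ∀ (v : Int) (k : (Int × Int)), k ∈ rest → (d.insert var v).get? k = none := by
      intro v k hk
      rw [PySem.Dict.get?_insert]
      have : k ≠ var := fun e => hvar (e ▸ hk)
      simp [this, hinv k (List.mem_cons_of_mem _ hk)]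
    have hrhs : (pvProduct01 (var :: rest).length).any
        (fun vals => satB eqs (extendD d (var :: rest) vals))
        = ((pvProduct01 rest.length).any (fun vals => satB eqs (extendD (d.insert var 0) rest vals))
          || (pvProduct01 rest.length).any (fun vals => satB eqs (extendD (d.insert var 1) rest vals))) := by
      simp only [List.length_cons, pvProduct01, List.flatMap_cons, List.flatMap_nil,
        List.any_append, List.append_nil, List.any_map]
      congr 1
    rw [pvDfs]
    by_cases hok : (eqs.all (fun eq =>
        if eq.1.all (fun t => d.contains t || !(PySem.Set.contains (PySem.Set.ofList (var :: rest)) t)) then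
          (eq.1.foldl (fun s t => s + d.getD t 0) 0) == eq.2
        else true)) = true
    · simp only [hok, if_true]
      rw [hrhs, ih _ (hinv' 0) hnd', ih _ (hinv' 1) hnd']
    · -- some fully-determined equation already fails: no extension can satisfy it
      simp only [hok, Bool.false_eq_true, if_false]
      rw [List.all_eq_true] at hok
      push Not at hok
      obtain ⟨eq, heqmem, hbad⟩ := hok
      by_cases hdet : (eq.1.all (fun t => d.contains t ||
          !(PySem.Set.contains (PySem.Set.ofList (var :: rest)) t))) = true
      · rw [if_pos hdet] at hbad
        simp only [ne_eq, Bool.not_eq_true] at hbad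
        symm
        rw [List.any_eq_false]
        intro vals _
        rw [Bool.not_eq_true]
        have hterm : ∀ t ∈ eq.1, t ∉ (var :: rest) := by
          intro t htm hmem
          rw [List.all_eq_true] at hdet
          have := hdet t htm
          have hcm : PySem.Set.contains (PySem.Set.ofList (var :: rest)) t = true := by
            rw [PySem.Set.contains_iff]
            rw [PySem.Set.mem_ofList]
            exact hmem
          rw [hcm] at this
          simp at this
          rw [PySem.Dict.contains_eq_isSome_get?, hinv t hmem] at this
          simp at this
        have hsum : (eq.1.foldl (fun s t => s + (extendD d (var :: rest) vals).getD t 0) 0)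
            = (eq.1.foldl (fun s t => s + d.getD t 0) 0) := by
          apply PySem.List.foldl_congr_mem
          intro s t htm
          rw [PySem.Dict.getD_eq_get?_getD, PySem.Dict.getD_eq_get?_getD,
            extend_get?_not_mem _ _ _ _ (hterm t htm)]
        rw [satB, List.all_eq_false]
        refine ⟨eq, heqmem, ?_⟩
        rw [hsum]
        simp [hbad]
      · -- the prune test fired, so the equation was in fact fully determined
        simp at hbad
        exfalso
        apply hdet
        rw [List.all_eq_true]
        intro t htm
        obtain ⟨ta, tb⟩ := t
        by_cases hc : d.contains (ta, tb) = true
        · simp [hc]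
        · simp only [Bool.not_eq_true] at hc
          obtain ⟨h1, h2⟩ := hbad.1 ta tb htm hc
          simp [hc]
          exact ⟨h1, h2⟩

-- the two ports build the same variable list
theorem tba_eq (known : List (List String)) (bomb : Int × Int) :
    ((PySem.List.pyRange 0 (known.length : Int) 1).foldl (fun acc r =>
      (PySem.List.pyRange 0 ((PySem.List.pyGetD known 0 []).length : Int) 1).foldl (fun acc c =>
        if pvWants known bomb r c then acc ++ [(r, c)] else acc) acc) [])
    = (PySem.List.pyRange 0 (known.length : Int) 1).flatMap (fun r =>
      ((PySem.List.pyRange 0 ((PySem.List.pyGetD known 0 []).length : Int) 1).filter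
        (fun c => pvWants known bomb r c)).map (fun c => (r, c))) := by
  have hin : ∀ (r : Int) (acc : List (Int × Int)),
      (PySem.List.pyRange 0 ((PySem.List.pyGetD known 0 []).length : Int) 1).foldl (fun acc c =>
        if pvWants known bomb r c then acc ++ [(r, c)] else acc) acc
      = acc ++ ((PySem.List.pyRange 0 ((PySem.List.pyGetD known 0 []).length : Int) 1).filter
          (fun c => pvWants known bomb r c)).map (fun c => (r, c)) := by
    intro r acc
    exact PySem.List.foldl_append_if _ _ _ _
  calc ((PySem.List.pyRange 0 (known.length : Int) 1).foldl (fun acc r =>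
      (PySem.List.pyRange 0 ((PySem.List.pyGetD known 0 []).length : Int) 1).foldl (fun acc c =>
        if pvWants known bomb r c then acc ++ [(r, c)] else acc) acc) [])
      = (PySem.List.pyRange 0 (known.length : Int) 1).foldl (fun acc r =>
          acc ++ ((PySem.List.pyRange 0 ((PySem.List.pyGetD known 0 []).length : Int) 1).filter
            (fun c => pvWants known bomb r c)).map (fun c => (r, c))) [] := by
        apply PySem.List.foldl_congr_mem
        intro acc r _
        exact hin r acc
    _ = _ := by
        rw [PySem.List.foldl_append_eq_flatMap]
        simp

theorem tba_nodup (known : List (List String)) (bomb : Int × Int) :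
    ((PySem.List.pyRange 0 (known.length : Int) 1).flatMap (fun r =>
      ((PySem.List.pyRange 0 ((PySem.List.pyGetD known 0 []).length : Int) 1).filter
        (fun c => pvWants known bomb r c)).map (fun c => (r, c)))).Nodup := by
  rw [List.nodup_flatMap]
  constructor
  · intro r _
    apply List.Nodup.map
    · intro a b h; exact congrArg Prod.snd h
    · exact (PySem.List.nodup_pyRange_one _ _).filter _
  · apply List.Pairwise.imp ?_ (PySem.List.nodup_pyRange_one 0 (known.length : Int))
    intro r1 r2 hne x h1 h2
    simp only [List.mem_map, List.mem_filter] at h1 h2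
    obtain ⟨c1, _, rfl⟩ := h1
    obtain ⟨c2, _, he⟩ := h2
    exact hne (congrArg Prod.fst he).symm

theorem tba_not_mem_bomb (known : List (List String)) (bomb : Int × Int) :
    bomb ∉ ((PySem.List.pyRange 0 (known.length : Int) 1).flatMap (fun r =>
      ((PySem.List.pyRange 0 ((PySem.List.pyGetD known 0 []).length : Int) 1).filter
        (fun c => pvWants known bomb r c)).map (fun c => (r, c)))) := by
  intro hmem
  simp only [List.mem_flatMap, List.mem_map, List.mem_filter] at hmem
  obtain ⟨r, _, c, ⟨_, hw⟩, he⟩ := hmem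
  rw [pvWants] at hw
  simp only [Bool.and_eq_true, bne_iff_ne] at hw
  exact hw.2 he.symm

-- ===== VERDICT (by name: the statement is the Claim_ definition above) =====
theorem chk_bomb_spec : Claim_equal_chk_bomb := by
  intro known bomb eqs _ _
  unfold Spec_chk_bomb chk_bomb chk_bomb_alt
  simp only
  rw [tba_eq known bomb]
  set T := (PySem.List.pyRange 0 (known.length : Int) 1).flatMap (fun r =>
      ((PySem.List.pyRange 0 ((PySem.List.pyGetD known 0 []).length : Int) 1).filter
        (fun c => pvWants known bomb r c)).map (fun c => (r, c))) with hT
  have hnd : T.Nodup := tba_nodup known bomb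
  have hb : bomb ∉ T := tba_not_mem_bomb known bomb
  rw [chk_bomb_loop_eq]
  have hinv : ∀ k ∈ T, (PySem.Dict.empty.insert bomb 1 : PySem.Dict (Int × Int) Int).get? k = none := by
    intro k hk
    rw [PySem.Dict.get?_insert]
    have : k ≠ bomb := fun e => hb (e ▸ hk)
    simp [this, PySem.Dict.get?_empty]
  rw [pvDfs_eq eqs T _ hinv hnd]
  have hfun : (fun vals => satB eqs ((extendD PySem.Dict.empty T vals).insert bomb 1))
      = (fun vals => satB eqs (extendD (PySem.Dict.empty.insert bomb 1) T vals)) := by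
    funext vals
    exact satB_congr _ _ _ (dict_get?_eq T vals bomb hb)
  rw [hfun]
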